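-- pv_equiv track=rewrite | github.com/34LiuNian/OopsNote | backend/app/clients/openai_client copy.py | _repair_invalid_string_escapes
-- ===== SOURCE A (Python) =====
-- def _repair_invalid_string_escapes(snippet: str) -> str:
--     """Repair invalid backslash escapes inside JSON string literals.
--
--     Only modifies backslashes *within* double-quoted strings.
--     If a backslash is not followed by a valid JSON escape char, it is doubled.
--     """
--
--     out: list[str] = []
--     in_string = False
--     i = 0
--     while i < len(snippet):
--         ch = snippet[i]
--
--         if in_string and ch in ("\n", "\r", "\t"):
--             # JSON does not allow literal control characters inside strings.
--             # Convert them into escaped sequences.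
--             if ch == "\n":
--                 out.append("\\n")
--             elif ch == "\r":
--                 out.append("\\r")
--             else:
--                 out.append("\\t")
--             i += 1
--             continue
--
--         if in_string and isinstance(ch, str) and ch and ord(ch) < 0x20:
--             # Other control chars: escape as unicode.
--             out.append(f"\\u{ord(ch):04x}")
--             i += 1
--             continue
--
--         if ch == '"':
--             # Toggle string state if quote is not escaped.
--             backslashes = 0
--             j = i - 1
--             while j >= 0 and snippet[j] == "\\":
--                 backslashes += 1
--                 j -= 1
--             if backslashes % 2 == 0:
--                 in_string = not in_string
--             out.append(ch)
--             i += 1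
--             continue
--
--         if in_string and ch == "\\":
--             if i + 1 >= len(snippet):
--                 out.append("\\\\")
--                 i += 1
--                 continue
--
--             nxt = snippet[i + 1]
--             # Some providers return JSON strings containing LaTeX with single backslashes
--             # like "\frac". In JSON, "\f" is a valid escape (form-feed), which would
--             # silently corrupt the payload rather than raising. If an escape letter is
--             # followed by an alphabetic char, treat it as LaTeX and preserve the backslash.
--             if nxt in ("b", "f", "n", "r", "t") and i + 2 < len(snippet) and snippet[i + 2].isalpha():
--                 out.append("\\\\")
--                 i += 1
--                 continue
--
--             if nxt in ('"', "\\", "/", "b", "f", "n", "r", "t"):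
--                 out.append("\\" + nxt)
--                 i += 2
--                 continue
--
--             if nxt == "u":
--                 # Keep unicode escape as-is (even if malformed; json.loads will still fail).
--                 out.append("\\u")
--                 i += 2
--                 continue
--
--             # Invalid escape sequence: double the backslash.
--             out.append("\\\\")
--             i += 1
--             continue
--
--         out.append(ch)
--         i += 1
--
--     return "".join(out)
-- ===== SOURCE B (Python) =====
-- _CTRL = {"\n": "\\n", "\r": "\\r", "\t": "\\t"}
-- _VALID = '"\\/bfnrtu'
--
--
-- def _repair_invalid_string_escapes(snippet: str) -> str:
--     """Repair invalid backslash escapes inside JSON string literals.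
--
--     Single forward pass: instead of re-scanning backwards at every quote,
--     maintain the parity of the run of backslashes immediately preceding
--     the current position incrementally.
--     """
--     n = len(snippet)
--     out = []
--     in_string = False
--     odd = False  # odd number of backslashes immediately before position i?
--     i = 0
--     while i < n:
--         ch = snippet[i]
--         if ch == '"':
--             if not odd:
--                 in_string = not in_string
--             out.append(ch)
--             odd = False
--             i += 1
--         elif not in_string:
--             out.append(ch)
--             odd = not odd if ch == "\\" else False
--             i += 1
--         elif ch == "\\":
--             nxt = snippet[i + 1] if i + 1 < n else None
--             if (
--                 nxt in ("b", "f", "n", "r", "t")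
--                 and i + 2 < n
--                 and snippet[i + 2].isalpha()
--             ):
--                 # LaTeX-style "\frac" etc.: keep the backslash, doubled.
--                 out.append("\\\\")
--                 odd = not odd
--                 i += 1
--             elif nxt is not None and nxt in _VALID:
--                 out.append("\\" + nxt)
--                 odd = odd if nxt == "\\" else False
--                 i += 2
--             else:
--                 out.append("\\\\")
--                 odd = not odd
--                 i += 1
--         else:
--             code = ord(ch)
--             if code < 0x20:
--                 out.append(_CTRL.get(ch) or "\\u%04x" % code)
--             else:
--                 out.append(ch)
--             odd = False
--             i += 1
--     return "".join(out)
-- ===== Notes on version B (the rewrite author's own statement) =====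
-- stated objective: alternative
-- what changed: B maintains the parity of the run of backslashes before the current position incrementally in a single forward pass, instead of A's backward re-scan of all preceding backslashes at every quote character (A is quadratic only on backslash-heavy inputs, so the measured times are similar).
import Mathlib
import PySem

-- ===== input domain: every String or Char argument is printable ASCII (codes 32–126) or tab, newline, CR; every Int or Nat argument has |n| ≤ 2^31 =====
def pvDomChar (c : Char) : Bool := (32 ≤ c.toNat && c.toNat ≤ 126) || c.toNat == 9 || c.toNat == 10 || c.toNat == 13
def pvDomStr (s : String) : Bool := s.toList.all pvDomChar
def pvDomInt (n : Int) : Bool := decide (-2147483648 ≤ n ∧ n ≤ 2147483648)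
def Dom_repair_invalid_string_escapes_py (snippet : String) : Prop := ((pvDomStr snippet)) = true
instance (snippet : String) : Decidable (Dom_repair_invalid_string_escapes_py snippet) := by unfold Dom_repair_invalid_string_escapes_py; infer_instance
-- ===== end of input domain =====

-- B replaces A's backward backslash re-scan at each quote by an incrementally
-- maintained run-parity flag (objective: alternative single-pass algorithm).

-- ===== PORT A =====

-- f"\\u{ord(ch):04x}" for ord ch < 0x20 (so two leading zeros); exact on that range
def pvHexDigit (n : Nat) : Char :=
  if n < 10 then Char.ofNat (48 + n) else Char.ofNat (87 + n)

def pvCtrlEsc (c : Char) : List Char :=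
  ['\\', 'u', '0', '0', pvHexDigit (c.toNat / 16), pvHexDigit (c.toNat % 16)]

-- the backward while loop "j = i-1; while j >= 0 and snippet[j] == '\\'":
-- prev holds snippet[:i] in reverse, so it counts the leading backslashes of prev
def pvBackCount (prev : List Char) : Nat :=
  match prev with
  | [] => 0
  | c :: rest => if c = '\\' then pvBackCount rest + 1 else 0

-- "i + 2 < len(snippet) and snippet[i+2].isalpha()" where rs2 = snippet[i+2:]
def pvAlphaHead (rs2 : List Char) : Bool :=
  match rs2 with
  | [] => false
  | c :: _ => PySem.Chars.isalpha c

-- A's main while loop; prev = snippet[:i] reversed (only read by the backward scan)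
def pvLoopA (inString : Bool) (prev rest out : List Char) : List Char :=
  match rest with
  | [] => out
  | ch :: rs =>
    if inString && (ch = '\n' || ch = '\r' || ch = '\t') then
      pvLoopA inString (ch :: prev) rs
        (out ++ (if ch = '\n' then ['\\', 'n'] else if ch = '\r' then ['\\', 'r'] else ['\\', 't']))
    else if inString && decide (ch.toNat < 0x20) then
      pvLoopA inString (ch :: prev) rs (out ++ pvCtrlEsc ch)
    else if ch = '"' then
      let backslashes := pvBackCount prev
      pvLoopA (if backslashes % 2 = 0 then !inString else inString) (ch :: prev) rs (out ++ [ch])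
    else if inString && ch = '\\' then
      match _h : rs with
      | [] => pvLoopA inString (ch :: prev) rs (out ++ ['\\', '\\'])
      | nxt :: rs2 =>
        if (nxt = 'b' || nxt = 'f' || nxt = 'n' || nxt = 'r' || nxt = 't') && pvAlphaHead rs2 then
          pvLoopA inString (ch :: prev) rs (out ++ ['\\', '\\'])
        else if nxt = '"' || nxt = '\\' || nxt = '/' || nxt = 'b' || nxt = 'f' || nxt = 'n' || nxt = 'r' || nxt = 't' then
          pvLoopA inString (nxt :: ch :: prev) rs2 (out ++ ['\\', nxt])
        else if nxt = 'u' then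
          pvLoopA inString (nxt :: ch :: prev) rs2 (out ++ ['\\', 'u'])
        else
          pvLoopA inString (ch :: prev) rs (out ++ ['\\', '\\'])
    else
      pvLoopA inString (ch :: prev) rs (out ++ [ch])
  termination_by rest.length
  decreasing_by all_goals (simp_all [List.length]; try omega)

def repair_invalid_string_escapes_py (snippet : String) : String :=
  String.ofList (pvLoopA false [] snippet.toList [])

-- ===== PORT B =====

-- _CTRL.get(ch) or "\\u%04x" % code  (code < 0x20)
def pvCtrlB (ch : Char) : List Char :=
  if ch = '\n' then ['\\', 'n']
  else if ch = '\r' then ['\\', 'r']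
  else if ch = '\t' then ['\\', 't']
  else pvCtrlEsc ch

-- B's single forward pass: odd = "odd number of backslashes immediately before i"
def pvLoopB (inString odd : Bool) (rest out : List Char) : List Char :=
  match rest with
  | [] => out
  | ch :: rs =>
    if ch = '"' then
      pvLoopB (if !odd then !inString else inString) false rs (out ++ [ch])
    else if !inString then
      pvLoopB inString (if ch = '\\' then !odd else false) rs (out ++ [ch])
    else if ch = '\\' then
      match _h : rs with
      | [] => pvLoopB inString (!odd) rs (out ++ ['\\', '\\'])
      | nxt :: rs2 =>
        if (nxt = 'b' || nxt = 'f' || nxt = 'n' || nxt = 'r' || nxt = 't') && pvAlphaHead rs2 then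
          pvLoopB inString (!odd) rs (out ++ ['\\', '\\'])
        else if nxt = '"' || nxt = '\\' || nxt = '/' || nxt = 'b' || nxt = 'f' || nxt = 'n' || nxt = 'r' || nxt = 't' || nxt = 'u' then
          pvLoopB inString (if nxt = '\\' then odd else false) rs2 (out ++ ['\\', nxt])
        else
          pvLoopB inString (!odd) rs (out ++ ['\\', '\\'])
    else if decide (ch.toNat < 0x20) then
      pvLoopB inString false rs (out ++ pvCtrlB ch)
    else
      pvLoopB inString false rs (out ++ [ch])
  termination_by rest.length
  decreasing_by all_goals (simp_all [List.length]; try omega)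

def repair_invalid_string_escapes_py_alt (snippet : String) : String :=
  String.ofList (pvLoopB false false snippet.toList [])

-- ===== PRECONDITION & SPEC =====
def Spec_repair_invalid_string_escapes_py (snippet : String) (out : String) : Prop := out = repair_invalid_string_escapes_py_alt snippet
instance (snippet : String) (out : String) : Decidable (Spec_repair_invalid_string_escapes_py snippet out) := by unfold Spec_repair_invalid_string_escapes_py; infer_instance

-- ===== CLAIM (what is proved, stated in full; the proofs are below) =====
def Claim_equal_repair_invalid_string_escapes_py : Prop := ∀ (snippet : String), Dom_repair_invalid_string_escapes_py snippet → Spec_repair_invalid_string_escapes_py snippet (repair_invalid_string_escapes_py snippet)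

-- ===== LEMMAS AND PROOFS =====

theorem pvParity_cons_bs (prev : List Char) :
    decide (pvBackCount ('\\' :: prev) % 2 = 1) = !decide (pvBackCount prev % 2 = 1) := by
  simp only [pvBackCount, if_pos]
  rcases Nat.mod_two_eq_zero_or_one (pvBackCount prev) with h | h <;> simp [Nat.add_mod, h]

theorem pvParity_cons (c : Char) (hc : ¬ c = '\\') (prev : List Char) :
    decide (pvBackCount (c :: prev) % 2 = 1) = false := by
  simp [pvBackCount, hc]

theorem pvLoop_eq (inString : Bool) (prev rest out : List Char) :
    pvLoopA inString prev rest out = pvLoopB inString (decide (pvBackCount prev % 2 = 1)) rest out := by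
  induction inString, prev, rest, out using pvLoopA.induct with
  | case1 => rw [pvLoopA.eq_def, pvLoopB.eq_def]
  | case2 inString prev out c rest hc ih =>
    simp only [Bool.and_eq_true, Bool.or_eq_true, decide_eq_true_eq] at hc
    obtain ⟨hs, hc⟩ := hc
    subst hs
    rcases hc with (h | h) | h <;> subst h <;>
      (simp only [reduceDIte, Char.reduceEq] at ih
       rw [pvLoopA.eq_def]
       simp only [Char.reduceEq, reduceIte, decide_true, decide_false, Bool.true_and,
         Bool.or_true, Bool.or_false]
       rw [ih]
       conv_rhs => rw [pvLoopB.eq_def]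
       simp [pvCtrlB, pvBackCount])
  | case3 inString prev out c rest h1 h2 ih =>
    simp only [Bool.and_eq_true, decide_eq_true_eq] at h2
    obtain ⟨hs, hlt⟩ := h2
    subst hs
    simp only [Bool.true_and, Bool.or_eq_true, decide_eq_true_eq, not_or] at h1
    have hq : ¬ c = '"' := fun h => absurd hlt (by subst h; decide)
    have hb : ¬ c = '\\' := fun h => absurd hlt (by subst h; decide)
    obtain ⟨⟨hn, hr⟩, ht⟩ := h1
    rw [pvLoopA.eq_def]
    simp only [hn, hr, ht, hlt, decide_false, decide_true, Bool.or_false,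
      Bool.and_false, Bool.true_and, reduceIte]
    rw [ih]
    conv_rhs => rw [pvLoopB.eq_def]
    simp [pvCtrlB, pvParity_cons c hb, hq, hb, hn, hr, ht, hlt]
  | case4 inString prev out rest backslashes h1 h2 ih =>
    have ih' : pvLoopA (if backslashes % 2 = 0 then !inString else inString) ('"' :: prev) rest
          (out ++ ['"'])
        = pvLoopB (if backslashes % 2 = 0 then !inString else inString)
            (decide (pvBackCount ('"' :: prev) % 2 = 1)) rest (out ++ ['"']) := ih
    rw [pvLoopA.eq_def]
    simp only [Char.reduceEq, decide_false, Bool.or_false, Bool.and_false,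
      reduceIte, Char.reduceToNat, Nat.reduceLT]
    rw [ih']
    conv_rhs => rw [pvLoopB.eq_def]
    simp only [reduceIte, pvParity_cons '"' (by decide) prev]
    rcases Nat.mod_two_eq_zero_or_one (pvBackCount prev) with h | h <;>
      simp [show backslashes = pvBackCount prev from rfl, h]
  | case5 inString prev out c h1 h2 h3 h4 ih =>
    simp only [Bool.and_eq_true, decide_eq_true_eq] at h4
    obtain ⟨hs, hb⟩ := h4; subst hs; subst hb
    rw [pvLoopA.eq_def]
    simp only [Char.reduceEq, reduceIte, Bool.true_and, decide_true, decide_false,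
      Bool.or_false, Char.reduceToNat, Nat.reduceLT]
    rw [ih]
    conv_rhs => rw [pvLoopB.eq_def]
    simp [pvParity_cons_bs]
  | case6 inString prev out c h1 h2 h3 h4 nxt rs2 hx ih =>
    simp only [Bool.and_eq_true, decide_eq_true_eq] at h4
    obtain ⟨hs, hb⟩ := h4; subst hs; subst hb
    rw [pvLoopA.eq_def]
    simp only [Char.reduceEq, reduceIte, Bool.true_and, decide_true, decide_false,
      Bool.or_false, Char.reduceToNat, Nat.reduceLT, hx, if_true]
    rw [ih]
    conv_rhs => rw [pvLoopB.eq_def]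
    simp [pvParity_cons_bs, hx]
  | case7 inString prev out c h1 h2 h3 h4 nxt rs2 hx hv ih =>
    simp only [Bool.and_eq_true, decide_eq_true_eq] at h4
    obtain ⟨hs, hb⟩ := h4; subst hs; subst hb
    have hAH : ((decide (nxt = 'b') || decide (nxt = 'f') || decide (nxt = 'n') ||
        decide (nxt = 'r') || decide (nxt = 't')) && pvAlphaHead rs2) = false := by
      simpa using hx
    rw [pvLoopA.eq_def]
    simp only [Char.reduceEq, Bool.true_and, decide_true, decide_false,
      Bool.or_false, Char.reduceToNat, Nat.reduceLT, hAH, Bool.false_eq_true,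
      if_false, hv, if_true]
    rw [ih]
    conv_rhs => rw [pvLoopB.eq_def]
    by_cases hnb : nxt = '\\'
    · subst hnb
      simp only [Char.reduceEq, decide_true, decide_false,
        Bool.false_or, Bool.or_false, Bool.false_and, Bool.false_eq_true, if_false,
        if_true, pvBackCount]
      have h2' : (pvBackCount prev + 1 + 1) % 2 = pvBackCount prev % 2 := by omega
      simp [h2']
    · simp only [Bool.or_eq_true, decide_eq_true_eq] at hv
      rcases hv with ((((((h | h) | h) | h) | h) | h) | h) | h <;>
        first
          | exact absurd h hnb
          | (subst h
             simp only [decide_true, Bool.true_or, Bool.or_true,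
               Bool.true_and] at hAH
             simp [hAH, pvParity_cons])
  | case8 inString prev out c h1 h2 h3 h4 rs2 hx hv ih =>
    simp only [Bool.and_eq_true, decide_eq_true_eq] at h4
    obtain ⟨hs, hb⟩ := h4; subst hs; subst hb
    rw [pvLoopA.eq_def]
    simp only [Char.reduceEq, reduceIte, Bool.true_and, decide_true, decide_false,
      Bool.or_false, Char.reduceToNat, Nat.reduceLT, Bool.false_and,
      Bool.false_eq_true, if_false]
    rw [ih]
    conv_rhs => rw [pvLoopB.eq_def]
    simp [pvParity_cons 'u' (by decide)]
  | case9 inString prev out c h1 h2 h3 h4 nxt rs2 hx hv hu ih =>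
    simp only [Bool.and_eq_true, decide_eq_true_eq] at h4
    obtain ⟨hs, hb⟩ := h4; subst hs; subst hb
    have hAH : ((decide (nxt = 'b') || decide (nxt = 'f') || decide (nxt = 'n') ||
        decide (nxt = 'r') || decide (nxt = 't')) && pvAlphaHead rs2) = false := by
      simpa using hx
    have hV : (decide (nxt = '"') || decide (nxt = '\\') || decide (nxt = '/') ||
        decide (nxt = 'b') || decide (nxt = 'f') || decide (nxt = 'n') ||
        decide (nxt = 'r') || decide (nxt = 't')) = false := by
      simpa using hv
    rw [pvLoopA.eq_def]
    simp only [Char.reduceEq, reduceIte, Bool.true_and, decide_true, decide_false,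
      Bool.or_false, Char.reduceToNat, Nat.reduceLT, hAH, hV,
      Bool.false_eq_true, if_false]
    rw [if_neg (by simpa using hu), ih]
    conv_rhs => rw [pvLoopB.eq_def]
    simp [pvParity_cons_bs, hAH, hV, hu]
  | case10 inString prev out c rest h1 h2 h3 h4 ih =>
    simp only [Bool.and_eq_true, decide_eq_true_eq, not_and] at h4
    by_cases hb : c = '\\'
    · subst hb
      have hs : inString = false := by
        cases inString
        · rfl
        · exact absurd rfl (h4 rfl)
      subst hs
      rw [pvLoopA.eq_def]
      simp only [Char.reduceEq, decide_false, decide_true, Bool.false_and,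
        Bool.false_eq_true, if_false ]
      rw [ih]
      conv_rhs => rw [pvLoopB.eq_def]
      simp [pvParity_cons_bs]
    · have hparity := pvParity_cons c hb prev
      have e1 : (inString && (decide (c = '\n') || decide (c = '\x0d') || decide (c = '\t'))) = false := by
        simpa using h1
      have e2 : (inString && decide (c.toNat < 32)) = false := by simpa using h2
      have e4 : (inString && decide (c = '\\')) = false := by simp [hb]
      rw [pvLoopA.eq_def]
      simp only [e1, e2, e4, h3, Bool.false_eq_true, if_false ]
      rw [ih]
      conv_rhs => rw [pvLoopB.eq_def]
      cases inString
      · simp [hparity, h3, hb]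
      · simp only [Bool.true_and, Bool.or_eq_true, decide_eq_true_eq, not_or,
          ] at h1 h2
        obtain ⟨⟨hn, hr⟩, ht⟩ := h1
        simp [hparity, h3, hb, h2]

-- ===== VERDICT (by name: the statement is the Claim_ definition above) =====
theorem repair_invalid_string_escapes_py_spec : Claim_equal_repair_invalid_string_escapes_py := by
  intro s _
  unfold Spec_repair_invalid_string_escapes_py repair_invalid_string_escapes_py repair_invalid_string_escapes_py_alt
  rw [pvLoop_eq]
  rfl
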